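-- pv_equiv track=rewrite | github.com/jnhm28467-lang/Ga | Ganaa.py | make_strong_password
-- ===== SOURCE A (Python) =====
-- def make_strong_password(password):
--     while len(password) < 8:
--         password += "x"
--
--     has_upper = any(ch.isupper() for ch in password)
--     has_lower = any(ch.islower() for ch in password)
--     has_digit = any(ch.isdigit() for ch in password)
--     has_symbol = any(not ch.isalnum() for ch in password)
--
--     if not has_upper:
--         password += "A"
--     if not has_lower:
--         password += "a"
--     if not has_digit:
--         password += "1"
--     if not has_symbol:
--         password += "@"
--
--     return password
-- ===== SOURCE B (Python) =====
-- def _cls(ch):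
--     """Representative of ch's character class: 'A' upper, 'a' lower, '1' digit, '@' symbol."""
--     if ch.isupper():
--         return "A"
--     if ch.islower():
--         return "a"
--     if ch.isdigit():
--         return "1"
--     if not ch.isalnum():
--         return "@"
--     return None
--
--
-- def make_strong_password(password):
--     password = password.ljust(8, "x")
--     seen = {_cls(ch) for ch in password}
--     return password + "".join(c for c in "Aa1@" if c not in seen)
-- ===== Notes on version B (the rewrite author's own statement) =====
-- stated objective: alternative
-- what changed: Instead of four independent any() scans with one boolean flag each, B classifies every character of the padded password into its class representative (upper/lower/digit/symbol filler), collects the set of representatives present in one pass, and appends the complement of the four fillers against that set; padding is ljust instead of a while loop.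
import Mathlib
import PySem

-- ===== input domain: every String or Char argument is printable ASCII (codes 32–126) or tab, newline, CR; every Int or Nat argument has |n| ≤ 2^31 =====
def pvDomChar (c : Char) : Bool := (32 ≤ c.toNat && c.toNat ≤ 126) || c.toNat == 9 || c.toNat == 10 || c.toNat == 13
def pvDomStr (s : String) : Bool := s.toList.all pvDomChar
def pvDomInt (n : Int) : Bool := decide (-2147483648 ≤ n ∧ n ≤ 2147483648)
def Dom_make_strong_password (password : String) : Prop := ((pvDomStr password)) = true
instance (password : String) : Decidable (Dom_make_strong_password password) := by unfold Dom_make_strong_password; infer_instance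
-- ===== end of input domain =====

-- B replaces the four any() scans by one classification pass collecting the set of
-- class representatives present, then appends the set-complement of "Aa1@" (objective: alternative).

-- ===== PORT A =====
-- while len(password) < 8: password += "x"
def aPad (p : List Char) : List Char :=
  if p.length < 8 then aPad (p ++ ['x']) else p
termination_by 8 - p.length
decreasing_by simp_all; omega

def make_strong_password (password : String) : String :=
  let p := aPad password.toList
  let has_upper := p.any PySem.Chars.isupper
  let has_lower := p.any PySem.Chars.islower
  let has_digit := p.any PySem.Chars.isdigit
  let has_symbol := p.any (fun ch => ! PySem.Chars.isalnum ch)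
  let p := if !has_upper then p ++ ['A'] else p
  let p := if !has_lower then p ++ ['a'] else p
  let p := if !has_digit then p ++ ['1'] else p
  let p := if !has_symbol then p ++ ['@'] else p
  String.mk p

-- ===== PORT B =====
-- class representative of a character ('A' upper, 'a' lower, '1' digit, '@' symbol)
def bCls (ch : Char) : Option Char :=
  if PySem.Chars.isupper ch then some 'A'
  else if PySem.Chars.islower ch then some 'a'
  else if PySem.Chars.isdigit ch then some '1'
  else if ! PySem.Chars.isalnum ch then some '@'
  else none

def make_strong_password_alt (password : String) : String :=
  -- password.ljust(8, "x"): exact, left-justify to width 8 padding with 'x'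
  let p := password.toList ++ List.replicate (8 - password.toList.length) 'x'
  -- seen = {_cls(ch) for ch in password}
  let seen : PySem.Set (Option Char) := PySem.Set.ofList (p.map bCls)
  -- "".join(c for c in "Aa1@" if c not in seen)
  String.mk (p ++ "Aa1@".toList.filter (fun c => ! PySem.Set.contains seen (some c)))

-- ===== PRECONDITION & SPEC =====
def Spec_make_strong_password (password : String) (out : String) : Prop := out = make_strong_password_alt password
instance (password : String) (out : String) : Decidable (Spec_make_strong_password password out) := by unfold Spec_make_strong_password; infer_instance

-- ===== CLAIM =====
def Claim_equal_make_strong_password : Prop := ∀ (password : String), Dom_make_strong_password password → Spec_make_strong_password password (make_strong_password password)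

-- ===== LEMMAS AND PROOFS =====
theorem aPad_eq (p : List Char) : aPad p = p ++ List.replicate (8 - p.length) 'x' := by
  fun_induction aPad p with
  | case1 p h ih =>
    rw [ih]
    have h0 : 8 - p.length = (8 - (p ++ ['x']).length) + 1 := by simp; omega
    rw [List.append_assoc, h0, List.replicate_succ]
    rfl
  | case2 p h =>
    have h0 : 8 - p.length = 0 := by omega
    simp [h0]

theorem bCls_A (ch : Char) : (bCls ch = some 'A') ↔ PySem.Chars.isupper ch = true := by
  unfold bCls; split_ifs <;> simp_all

theorem not_upper_of_lower (c : Char) (h : PySem.Chars.islower c = true) :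
    PySem.Chars.isupper c = false := by
  simp only [PySem.Chars.islower, PySem.Chars.isupper, Bool.and_eq_true, decide_eq_true_eq] at *
  simp only [Bool.and_eq_false_iff, decide_eq_false_iff_not, not_le]
  right
  exact lt_of_lt_of_le (by decide : 'Z' < 'a') h.1

theorem bCls_a (ch : Char) : (bCls ch = some 'a') ↔ PySem.Chars.islower ch = true := by
  unfold bCls
  constructor
  · intro h; split_ifs at h <;> simp_all
  · intro h; simp [not_upper_of_lower ch h, h]

theorem not_upper_of_digit (c : Char) (h : PySem.Chars.isdigit c = true) :
    PySem.Chars.isupper c = false := by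
  simp only [PySem.Chars.isdigit, PySem.Chars.isupper, Bool.and_eq_true, decide_eq_true_eq] at *
  simp only [Bool.and_eq_false_iff, decide_eq_false_iff_not, not_le]
  left
  exact lt_of_le_of_lt h.2 (by decide : '9' < 'A')

theorem not_lower_of_digit (c : Char) (h : PySem.Chars.isdigit c = true) :
    PySem.Chars.islower c = false := by
  simp only [PySem.Chars.isdigit, PySem.Chars.islower, Bool.and_eq_true, decide_eq_true_eq] at *
  simp only [Bool.and_eq_false_iff, decide_eq_false_iff_not, not_le]
  left
  exact lt_of_le_of_lt h.2 (by decide : '9' < 'a')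

theorem bCls_1 (ch : Char) : (bCls ch = some '1') ↔ PySem.Chars.isdigit ch = true := by
  unfold bCls
  constructor
  · intro h; split_ifs at h <;> simp_all
  · intro h; simp [not_upper_of_digit ch h, not_lower_of_digit ch h, h]

theorem bCls_at (ch : Char) : (bCls ch = some '@') ↔ PySem.Chars.isalnum ch = false := by
  unfold bCls
  constructor
  · intro h; split_ifs at h <;> simp_all
  · intro h
    have := h
    simp only [PySem.Chars.isalnum, PySem.Chars.isalpha, Bool.or_eq_false_iff] at this
    simp [this.1.1, this.1.2, this.2, h]

theorem mem_seen (p : List Char) (c : Char) :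
    (PySem.Set.contains (PySem.Set.ofList (p.map bCls)) (some c) = true) ↔
      ∃ ch ∈ p, bCls ch = some c := by
  rw [PySem.Set.contains_iff, PySem.Set.mem_ofList]
  simp [List.mem_map]

-- ===== VERDICT =====
theorem make_strong_password_spec : Claim_equal_make_strong_password := by
  intro password _
  simp only [Spec_make_strong_password, make_strong_password, make_strong_password_alt, aPad_eq]
  obtain ⟨q, hq⟩ : ∃ q, password.toList ++ List.replicate (8 - password.toList.length) 'x' = q :=
    ⟨_, rfl⟩
  rw [hq]
  have hA : (PySem.Set.contains (PySem.Set.ofList (q.map bCls)) (some 'A')) =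
      q.any PySem.Chars.isupper := by
    rw [Bool.eq_iff_iff, mem_seen]; simp only [List.any_eq_true, bCls_A]
  have ha : (PySem.Set.contains (PySem.Set.ofList (q.map bCls)) (some 'a')) =
      q.any PySem.Chars.islower := by
    rw [Bool.eq_iff_iff, mem_seen]; simp only [List.any_eq_true, bCls_a]
  have h1 : (PySem.Set.contains (PySem.Set.ofList (q.map bCls)) (some '1')) =
      q.any PySem.Chars.isdigit := by
    rw [Bool.eq_iff_iff, mem_seen]; simp only [List.any_eq_true, bCls_1]
  have hs : (PySem.Set.contains (PySem.Set.ofList (q.map bCls)) (some '@')) =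
      q.any (fun ch => ! PySem.Chars.isalnum ch) := by
    rw [Bool.eq_iff_iff, mem_seen]
    simp only [List.any_eq_true, bCls_at, Bool.not_eq_true']
  show String.mk _ = String.mk (q ++ List.filter _ ('A' :: 'a' :: '1' :: '@' :: []))
  simp only [List.filter, hA, ha, h1, hs]
  cases e1 : q.any PySem.Chars.isupper <;>
    cases e2 : q.any PySem.Chars.islower <;>
      cases e3 : q.any PySem.Chars.isdigit <;>
        cases e4 : q.any (fun ch => ! PySem.Chars.isalnum ch) <;>
          simp
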